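-- pv_equiv track=rewrite | github.com/Sieonn/Python | 프로그래머스/Lv. 0/배열 만들기 4.py | solution
-- ===== SOURCE A (Python) =====
-- def solution(arr):
--     i = 0
--     stk = []
--     while i < len(arr):
--         if  len(stk) == 0:
--             stk.append(arr[i])
--             i += 1
--         elif len(stk) != 0 and stk[-1] < arr[i]:
--             stk.append(arr[i])
--             i += 1
--         else:
--             stk.remove(stk[-1])
--     return stk
-- ===== SOURCE B (Python) =====
-- def solution(arr):
--     res = []
--     m = None
--     for x in reversed(arr):
--         if m is None or x < m:
--             res.append(x)
--             m = x
--     res.reverse()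
--     return res
-- ===== Notes on version B (the rewrite author's own statement) =====
-- stated objective: faster
-- what changed: Replaced A's forward monotonic-stack loop (which stalls its index and pops by value-removal) with a single backward running-minimum scan: an element is kept iff it is strictly below every element to its right, so no stack and no popping at all.
import Mathlib
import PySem

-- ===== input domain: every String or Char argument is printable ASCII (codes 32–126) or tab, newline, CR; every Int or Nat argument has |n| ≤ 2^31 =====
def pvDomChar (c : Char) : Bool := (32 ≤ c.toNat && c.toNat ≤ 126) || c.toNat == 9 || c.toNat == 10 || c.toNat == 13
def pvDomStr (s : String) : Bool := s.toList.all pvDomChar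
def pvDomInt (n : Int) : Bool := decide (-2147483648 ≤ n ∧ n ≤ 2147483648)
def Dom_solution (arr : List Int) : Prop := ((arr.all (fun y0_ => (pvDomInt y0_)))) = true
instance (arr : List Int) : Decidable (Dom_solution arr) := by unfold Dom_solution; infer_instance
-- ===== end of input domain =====

-- B replaces A's forward monotonic-stack loop with a single backward running-minimum scan
-- (keep an element iff it is strictly below every element to its right); return value only.


-- ===== PORT A =====
-- termination helper for the pop branch of A's while loop (stk.remove(stk[-1]) shortens stk)
theorem pvRemoveLastD_length_lt (stk : List Int) (h : stk ≠ []) :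
    ((PySem.List.remove? stk (PySem.List.pyGetD stk (-1) 0)).getD stk).length < stk.length := by
  rw [PySem.List.pyGetD_neg_one stk 0 h,
      PySem.List.remove?_eq_some_erase stk _ (stk.getLast_mem h), Option.getD_some]
  rw [List.length_erase_of_mem (stk.getLast_mem h)]
  have : 0 < stk.length := List.length_pos_iff.mpr h
  omega

-- the while loop of A: state (remaining suffix arr[i:], stk); branches in A's order
def solutionLoop : List Int → List Int → List Int
  | [], stk => stk
  | x :: rs, stk =>
    if stk.length = 0 then
      solutionLoop rs (stk ++ [x])
    else if stk.length ≠ 0 ∧ PySem.List.pyGetD stk (-1) 0 < x then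
      solutionLoop rs (stk ++ [x])
    else
      solutionLoop (x :: rs) ((PySem.List.remove? stk (PySem.List.pyGetD stk (-1) 0)).getD stk)
termination_by rest stk => (rest.length, stk.length)
decreasing_by
  · exact Prod.Lex.left _ _ (by simp)
  · exact Prod.Lex.left _ _ (by simp)
  · exact Prod.Lex.right _ (pvRemoveLastD_length_lt stk (by rename_i h _; simpa using h))

def solution (arr : List Int) : List Int := solutionLoop arr []

-- ===== PORT B =====
-- one step of Source B's backward scan: state (res, m); keep x iff m is None or x < m
def bstep (st : List Int × Option Int) (x : Int) : List Int × Option Int :=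
  match st.2 with
  | none => (st.1 ++ [x], some x)
  | some m => if x < m then (st.1 ++ [x], some x) else st

def solution_alt (arr : List Int) : List Int :=
  ((arr.reverse.foldl bstep ([], none)).1).reverse

-- ===== PRECONDITION & SPEC =====
def Spec_solution (arr : List Int) (out : List Int) : Prop := out = solution_alt arr
instance (arr : List Int) (out : List Int) : Decidable (Spec_solution arr out) := by unfold Spec_solution; infer_instance

-- ===== CLAIM (what is proved, stated in full; the proofs are below) =====
def Claim_equal_solution : Prop := ∀ (arr : List Int), Dom_solution arr → Spec_solution arr (solution arr)

-- ===== LEMMAS AND PROOFS =====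

-- proof-side: collapse A's pop branch — pop while stk nonempty and stk[-1] >= x
def popGE (x : Int) (stk : List Int) : List Int :=
  if h : stk = [] then stk
  else if x ≤ stk.getLast h then popGE x stk.dropLast
  else stk
termination_by stk.length
decreasing_by
  have : 0 < stk.length := List.length_pos_iff.mpr h
  simpa [List.length_dropLast] using Nat.sub_lt this Nat.one_pos

-- proof-side: B's kept list as a structural foldr (fstep keeps y iff it is below the head)
def fstep (y : Int) (acc : List Int) : List Int :=
  match acc with
  | [] => [y]
  | a :: _ => if y < a then y :: acc else acc

def fmin (l : List Int) : List Int := l.foldr fstep []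

-- every element of a strictly increasing list other than the last is below the last
theorem mem_dropLast_lt_getLast {l : List Int} (hs : l.Pairwise (· < ·)) (h : l ≠ [])
    {a : Int} (ha : a ∈ l.dropLast) : a < l.getLast h := by
  have hd := l.dropLast_append_getLast h
  rw [← hd] at hs
  rcases (List.pairwise_append.mp hs) with ⟨_, _, hcross⟩
  exact hcross a ha _ (List.mem_singleton.mpr rfl)

-- on a strictly increasing stack, A's stk.remove(stk[-1]) is exactly dropping the last element
theorem removeD_eq_dropLast {stk : List Int} (hs : stk.Pairwise (· < ·)) (h : stk ≠ []) :
    (PySem.List.remove? stk (PySem.List.pyGetD stk (-1) 0)).getD stk = stk.dropLast := by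
  rw [PySem.List.pyGetD_neg_one stk 0 h,
      PySem.List.remove?_eq_some_erase stk _ (stk.getLast_mem h), Option.getD_some]
  have hnot : stk.getLast h ∉ stk.dropLast := fun hmem =>
    absurd (mem_dropLast_lt_getLast hs h hmem) (lt_irrefl _)
  generalize hv : stk.getLast h = v at hnot ⊢
  conv_lhs => rw [← stk.dropLast_append_getLast h, hv]
  rw [List.erase_append_right _ hnot]
  simp

-- popGE preserves strict increase and every survivor is below x
theorem popGE_sorted_lt (x : Int) (stk : List Int) (hs : stk.Pairwise (· < ·)) :
    (popGE x stk).Pairwise (· < ·) ∧ ∀ a ∈ popGE x stk, a < x := by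
  induction stk using popGE.induct x with
  | case1 => simp [popGE]
  | case2 stk h hge ih =>
    rw [popGE, dif_neg h, if_pos hge]
    exact ih (hs.sublist stk.dropLast_sublist)
  | case3 stk h hlt =>
    rw [popGE, dif_neg h, if_neg hlt]
    refine ⟨hs, fun a ha => ?_⟩
    rw [← stk.dropLast_append_getLast h, List.mem_append] at ha
    rcases ha with ha | ha
    · exact lt_trans (mem_dropLast_lt_getLast hs h ha) (lt_of_not_ge hlt)
    · rw [List.mem_singleton.mp ha]; exact lt_of_not_ge hlt

-- one element of A's outer loop equals popping then pushing (inner pops collapsed)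
theorem solutionLoop_step (x : Int) (rs stk : List Int) (hs : stk.Pairwise (· < ·)) :
    solutionLoop (x :: rs) stk = solutionLoop rs (popGE x stk ++ [x]) := by
  induction stk using popGE.induct x with
  | case1 => rw [solutionLoop, popGE]; simp
  | case2 stk h hge ih =>
    have hlen : ¬ stk.length = 0 := by simpa [List.length_eq_zero_iff] using h
    have hlast : PySem.List.pyGetD stk (-1) 0 = stk.getLast h :=
      PySem.List.pyGetD_neg_one stk 0 h
    have hp : popGE x stk = popGE x stk.dropLast := by rw [popGE, dif_neg h, if_pos hge]
    rw [solutionLoop, if_neg hlen, if_neg (by rw [hlast]; omega),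
        removeD_eq_dropLast hs h, ih (hs.sublist stk.dropLast_sublist), hp]
  | case3 stk h hlt =>
    have hlen : ¬ stk.length = 0 := by simpa [List.length_eq_zero_iff] using h
    have hlast : PySem.List.pyGetD stk (-1) 0 = stk.getLast h :=
      PySem.List.pyGetD_neg_one stk 0 h
    rw [solutionLoop, if_neg hlen, if_pos ⟨hlen, by rw [hlast]; omega⟩,
        popGE, dif_neg h, if_neg hlt]

-- A's whole while loop equals a fold of pop-then-push steps
theorem solutionLoop_eq_foldl (rest : List Int) :
    ∀ stk, stk.Pairwise (· < ·) →
      solutionLoop rest stk = rest.foldl (fun stk x => popGE x stk ++ [x]) stk := by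
  induction rest with
  | nil => intro stk _; rw [solutionLoop]; rfl
  | cons x rs ih =>
    intro stk hs
    rw [solutionLoop_step x rs stk hs, List.foldl_cons]
    refine ih _ (List.pairwise_append.mpr ⟨(popGE_sorted_lt x stk hs).1, by simp, ?_⟩)
    intro a ha b hb
    rw [List.mem_singleton.mp hb]
    exact (popGE_sorted_lt x stk hs).2 a ha

-- popGE only removes elements from the end
theorem popGE_prefix (x : Int) (l : List Int) : popGE x l <+: l := by
  induction l using popGE.induct x with
  | case1 => simp [popGE]
  | case2 l h hge ih =>
    rw [popGE, dif_neg h, if_pos hge]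
    exact ih.trans l.dropLast_prefix
  | case3 l h hlt => rw [popGE, dif_neg h, if_neg hlt]

-- a survivor below x keeps its place at the head
theorem popGE_cons (x y : Int) (l : List Int) (hy : y < x) :
    popGE x (y :: l) = y :: popGE x l := by
  induction l using popGE.induct x with
  | case1 =>
    rw [popGE, dif_neg (List.cons_ne_nil y []), List.getLast_singleton,
        if_neg (by omega), popGE, dif_pos rfl]
  | case2 l h hge ih =>
    rw [popGE, dif_neg (List.cons_ne_nil y l), List.getLast_cons h, if_pos hge]
    obtain ⟨b, bs, rfl⟩ := List.exists_cons_of_ne_nil h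
    rw [List.dropLast_cons₂, ih]
    conv_rhs => rw [popGE, dif_neg (List.cons_ne_nil b bs), if_pos hge]
  | case3 l h hlt =>
    rw [popGE, dif_neg (List.cons_ne_nil y l), List.getLast_cons h, if_neg hlt]
    conv_rhs => rw [popGE, dif_neg h, if_neg hlt]

-- if everything is ≥ x, popGE pops everything
theorem popGE_nil_of_le (x : Int) (l : List Int) (hall : ∀ a ∈ l, x ≤ a) :
    popGE x l = [] := by
  induction l using popGE.induct x with
  | case1 => rw [popGE, dif_pos rfl]
  | case2 l h hge ih =>
    rw [popGE, dif_neg h, if_pos hge]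
    exact ih fun a ha => hall a ((l.dropLast_sublist).subset ha)
  | case3 l h hlt => exact absurd (hall _ (l.getLast_mem h)) (by omega)

-- popGE on the empty and singleton lists
theorem popGE_nil (x : Int) : popGE x [] = [] := by
  rw [popGE, dif_pos rfl]

theorem popGE_singleton (x y : Int) : popGE x [y] = if x ≤ y then [] else [y] := by
  rw [popGE, dif_neg (List.cons_ne_nil y []), List.getLast_singleton]
  simp [popGE_nil]

-- if popGE empties a nonempty list, its head was already ≥ x
theorem head_ge_of_popGE_nil (x : Int) (l : List Int) (a : Int) (ha : l.head? = some a)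
    (hnil : popGE x l = []) : x ≤ a := by
  induction l using popGE.induct x generalizing a with
  | case1 => simp at ha
  | case2 l h hge ih =>
    rw [popGE, dif_neg h, if_pos hge] at hnil
    obtain ⟨b, bs, rfl⟩ := List.exists_cons_of_ne_nil h
    cases bs with
    | nil =>
      simp only [List.head?_cons, Option.some.injEq] at ha
      simpa [← ha] using hge
    | cons d ds =>
      rw [List.dropLast_cons₂] at hnil ih
      simp only [List.head?_cons, Option.some.injEq] at ha
      exact ha ▸ ih b rfl hnil
  | case3 l h hlt =>
    rw [popGE, dif_neg h, if_neg hlt] at hnil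
    exact absurd hnil h

-- fmin is strictly increasing
theorem fmin_sorted (l : List Int) : (fmin l).Pairwise (· < ·) := by
  induction l with
  | nil => simp [fmin]
  | cons y ys ih =>
    show (fstep y (fmin ys)).Pairwise (· < ·)
    cases hm : fmin ys with
    | nil => simp [fstep]
    | cons a t =>
      rw [hm] at ih
      by_cases hy : y < a
      · rw [show fstep y (a :: t) = y :: a :: t from if_pos hy]
        refine ih.cons fun b hb => ?_
        rcases List.mem_cons.mp hb with rfl | hb
        · exact hy
        · exact lt_trans hy (List.rel_of_pairwise_cons ih hb)
      · rw [show fstep y (a :: t) = a :: t from if_neg hy]; exact ih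

-- key bridge: popping the running stack with x then pushing x = fmin extended by x on the right
theorem popGE_fmin (ys : List Int) (x : Int) :
    popGE x (fmin ys) ++ [x] = ys.foldr fstep [x] := by
  induction ys with
  | nil => show popGE x [] ++ [x] = [x]; rw [popGE_nil]; rfl
  | cons y ys ih =>
    show popGE x (fstep y (fmin ys)) ++ [x] = fstep y (ys.foldr fstep [x])
    rw [← ih]
    have hsort := fmin_sorted ys
    cases hm : fmin ys with
    | nil =>
      show popGE x (fstep y []) ++ [x] = fstep y (popGE x [] ++ [x])
      rw [popGE_nil, List.nil_append,
          show fstep y ([] : List Int) = [y] from rfl, popGE_singleton,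
          show fstep y [x] = if y < x then y :: [x] else [x] from rfl]
      by_cases hx : y < x
      · rw [if_neg (by omega), if_pos hx]; rfl
      · rw [if_pos (by omega), if_neg hx]; rfl
    | cons a t =>
      rw [hm] at hsort
      by_cases hy : y < a
      · rw [show fstep y (a :: t) = y :: a :: t from if_pos hy]
        by_cases hx : y < x
        · rw [popGE_cons x y (a :: t) hx]
          cases hp : popGE x (a :: t) with
          | nil => rw [List.nil_append, show fstep y [x] = if y < x then y :: [x] else [x] from rfl, if_pos hx]; rfl
          | cons b bs =>
            have hb : b = a := by
              have := popGE_prefix x (a :: t)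
              rw [hp] at this
              obtain ⟨tail, htail⟩ := this
              exact (List.cons_eq_cons.mp htail).1
            rw [hb, List.cons_append]
            exact (if_pos hy).symm
        · have hall : ∀ b ∈ a :: t, x ≤ b := by
            intro b hb
            rcases List.mem_cons.mp hb with rfl | hb
            · omega
            · have := List.rel_of_pairwise_cons hsort hb; omega
          rw [popGE_nil_of_le x (a :: t) hall,
              popGE_nil_of_le x (y :: a :: t) (fun b hb => by
                rcases List.mem_cons.mp hb with rfl | hb
                · omega
                · have := hall b hb; omega),
              List.nil_append,
              show fstep y [x] = if y < x then y :: [x] else [x] from rfl, if_neg hx]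
      · rw [show fstep y (a :: t) = a :: t from if_neg hy]
        cases hp : popGE x (a :: t) with
        | nil =>
          have hx : x ≤ a := head_ge_of_popGE_nil x (a :: t) a rfl hp
          rw [List.nil_append, show fstep y [x] = if y < x then y :: [x] else [x] from rfl,
              if_neg (by omega)]
        | cons b bs =>
          have hb : b = a := by
            have := popGE_prefix x (a :: t)
            rw [hp] at this
            obtain ⟨tail, htail⟩ := this
            exact (List.cons_eq_cons.mp htail).1
          rw [hb, List.cons_append]
          exact (if_neg hy).symm

-- A equals fmin
theorem solution_eq_fmin (arr : List Int) : solution arr = fmin arr := by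
  unfold solution
  rw [solutionLoop_eq_foldl arr [] List.Pairwise.nil]
  induction arr using List.reverseRecOn with
  | nil => rfl
  | append_singleton ys x ih =>
    rw [List.foldl_append, List.foldl_cons, List.foldl_nil, ih, popGE_fmin]
    unfold fmin
    rw [List.foldr_append]
    rfl

-- B's backward fold carries ((fmin arr).reverse, its running minimum = head of fmin)
theorem bfold_eq_fmin (arr : List Int) :
    arr.foldr (fun x st => bstep st x) ([], none) = ((fmin arr).reverse, (fmin arr).head?) := by
  induction arr with
  | nil => rfl
  | cons y ys ih =>
    rw [List.foldr_cons, ih]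
    show bstep ((fmin ys).reverse, (fmin ys).head?) y = _
    have : fmin (y :: ys) = fstep y (fmin ys) := rfl
    rw [this]
    cases hm : fmin ys with
    | nil => rfl
    | cons a t =>
      by_cases hy : y < a
      · rw [show fstep y (a :: t) = y :: a :: t from if_pos hy]
        simp [bstep, hy]
      · rw [show fstep y (a :: t) = a :: t from if_neg hy]
        simp [bstep, hy]

-- B equals fmin
theorem solution_alt_eq_fmin (arr : List Int) : solution_alt arr = fmin arr := by
  unfold solution_alt
  rw [List.foldl_reverse, bfold_eq_fmin]
  simp

-- ===== VERDICT (by name: the statement is the Claim_ definition above) =====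
theorem solution_spec : Claim_equal_solution := by
  intro arr _
  unfold Spec_solution
  rw [solution_eq_fmin, solution_alt_eq_fmin]
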